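-- pv_equiv track=rewrite | github.com/brucelit/slpn-miner | src/stochastic_cross_product.py | set_and_get_initial_state
-- ===== SOURCE A (Python) =====
-- def set_and_get_initial_state(trace_incoming_transitions,
--                               srg_incoming_transitions
--                               ):
--     '''
--
--     :param trace_incoming_transitions:
--     :param srg_incoming_transitions:
--     :param cross_product:
--     :return: the initial states in trace and srg
--     '''
--     for s1 in trace_incoming_transitions:
--         if trace_incoming_transitions[s1] is None:
--             for s2 in srg_incoming_transitions:
--                 if len(srg_incoming_transitions[s2]) == 0:
--                     return s1, s2
-- ===== SOURCE B (Python) =====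
-- def set_and_get_initial_state(trace_incoming_transitions,
--                               srg_incoming_transitions
--                               ):
--     # Two independent linear searches instead of a nested scan.
--     s1 = next((k for k, v in trace_incoming_transitions.items() if v is None), None)
--     s2 = next((k for k, v in srg_incoming_transitions.items() if len(v) == 0), None)
--     if s1 is None or s2 is None:
--         return None
--     return s1, s2
-- ===== Notes on version B (the rewrite author's own statement) =====
-- stated objective: faster
-- what changed: The nested loop (for each None-valued trace state, rescan all SRG states) is replaced by two independent linear searches for the first None-valued trace key and the first empty-valued SRG key, combined at the end.
import Mathlib
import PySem

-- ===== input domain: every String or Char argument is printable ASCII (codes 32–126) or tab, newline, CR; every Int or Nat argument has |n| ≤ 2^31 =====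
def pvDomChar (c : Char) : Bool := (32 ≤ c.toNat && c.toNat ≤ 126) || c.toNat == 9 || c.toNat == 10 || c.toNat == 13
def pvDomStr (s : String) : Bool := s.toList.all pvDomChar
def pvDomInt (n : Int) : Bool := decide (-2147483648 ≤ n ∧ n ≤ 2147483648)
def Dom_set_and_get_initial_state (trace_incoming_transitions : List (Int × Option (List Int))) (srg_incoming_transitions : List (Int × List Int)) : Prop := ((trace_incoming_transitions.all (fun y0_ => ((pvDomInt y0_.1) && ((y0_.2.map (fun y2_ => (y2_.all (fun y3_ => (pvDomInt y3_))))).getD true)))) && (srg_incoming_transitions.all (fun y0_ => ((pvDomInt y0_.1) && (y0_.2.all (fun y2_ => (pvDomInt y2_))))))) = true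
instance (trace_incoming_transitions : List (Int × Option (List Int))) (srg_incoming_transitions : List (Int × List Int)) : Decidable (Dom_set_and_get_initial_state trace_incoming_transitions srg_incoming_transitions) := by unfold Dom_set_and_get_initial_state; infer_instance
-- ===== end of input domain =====

-- B replaces A's nested scan by two independent linear searches (simpler decomposition);
-- equivalence is about the return value only (neither version mutates its arguments).

-- ===== PORT A =====
-- inner loop: 'for s2 in srg_incoming_transitions: if len(srg_incoming_transitions[s2]) == 0: return s1, s2'
-- dict indexing srg_full[s2] is first-match lookup on the association list; the `none` branch of the
-- lookup is unreachable (s2 is drawn from the same list) and mirrors Python's impossible KeyError.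
def set_and_get_initial_state_inner (srg_full : List (Int × List Int)) (s1 : Int) : List (Int × List Int) → Option (Int × Int)
  | [] => none
  | (s2, _) :: rest =>
    match srg_full.find? (fun q => q.1 == s2) with
    | some p => if p.2.length = 0 then some (s1, s2) else set_and_get_initial_state_inner srg_full s1 rest
    | none => set_and_get_initial_state_inner srg_full s1 rest

-- outer loop: 'for s1 in trace_incoming_transitions: if trace_incoming_transitions[s1] is None: …'
def set_and_get_initial_state_outer (t_full : List (Int × Option (List Int))) (srg : List (Int × List Int)) : List (Int × Option (List Int)) → Option (Int × Int)
  | [] => none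
  | (s1, _) :: rest =>
    match t_full.find? (fun q => q.1 == s1) with
    | some p =>
      match p.2 with
      | none =>
        match set_and_get_initial_state_inner srg s1 srg with
        | some r => some r
        | none => set_and_get_initial_state_outer t_full srg rest
      | some _ => set_and_get_initial_state_outer t_full srg rest
    | none => set_and_get_initial_state_outer t_full srg rest

def set_and_get_initial_state (trace_incoming_transitions : List (Int × Option (List Int))) (srg_incoming_transitions : List (Int × List Int)) : Option (Int × Int) :=
  set_and_get_initial_state_outer trace_incoming_transitions srg_incoming_transitions trace_incoming_transitions

-- ===== PORT B =====
def set_and_get_initial_state_alt (trace_incoming_transitions : List (Int × Option (List Int))) (srg_incoming_transitions : List (Int × List Int)) : Option (Int × Int) :=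
  match trace_incoming_transitions.find? (fun p => p.2.isNone),
        srg_incoming_transitions.find? (fun p => p.2.length == 0) with
  | some p1, some p2 => some (p1.1, p2.1)
  | _, _ => none

-- ===== PRECONDITION & SPEC =====
-- Pre_ excludes association lists with duplicate keys, which do not represent any Python dict
-- (the Python arguments are dicts; duplicates would make first-match lookup vs. pair iteration diverge).
def Pre_set_and_get_initial_state (trace_incoming_transitions : List (Int × Option (List Int))) (srg_incoming_transitions : List (Int × List Int)) : Prop :=
  (trace_incoming_transitions.map (·.1)).Nodup ∧ (srg_incoming_transitions.map (·.1)).Nodup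
instance (trace_incoming_transitions : List (Int × Option (List Int))) (srg_incoming_transitions : List (Int × List Int)) : Decidable (Pre_set_and_get_initial_state trace_incoming_transitions srg_incoming_transitions) := by unfold Pre_set_and_get_initial_state; infer_instance

def pvWitness_set_and_get_initial_state : (List (Int × Option (List Int))) × (List (Int × List Int)) :=
  ([(0, none), (2, some [1])], [(1, [3]), (5, [])])

def Spec_set_and_get_initial_state (trace_incoming_transitions : List (Int × Option (List Int))) (srg_incoming_transitions : List (Int × List Int)) (out : Option (Int × Int)) : Prop := out = set_and_get_initial_state_alt trace_incoming_transitions srg_incoming_transitions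
instance (trace_incoming_transitions : List (Int × Option (List Int))) (srg_incoming_transitions : List (Int × List Int)) (out : Option (Int × Int)) : Decidable (Spec_set_and_get_initial_state trace_incoming_transitions srg_incoming_transitions out) := by unfold Spec_set_and_get_initial_state; infer_instance

-- ===== CLAIM (what is proved, stated in full; the proofs are below) =====
def Claim_equal_set_and_get_initial_state : Prop := ∀ (trace_incoming_transitions : List (Int × Option (List Int))) (srg_incoming_transitions : List (Int × List Int)), Dom_set_and_get_initial_state trace_incoming_transitions srg_incoming_transitions → Pre_set_and_get_initial_state trace_incoming_transitions srg_incoming_transitions → Spec_set_and_get_initial_state trace_incoming_transitions srg_incoming_transitions (set_and_get_initial_state trace_incoming_transitions srg_incoming_transitions)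

-- ===== LEMMAS AND PROOFS =====

-- In a duplicate-key-free association list, looking up the key of a member pair returns that pair.
theorem find_self {ν : Type} (l : List (Int × ν)) (hnd : (l.map (·.1)).Nodup) :
    ∀ p ∈ l, l.find? (fun q => q.1 == p.1) = some p := by
  induction l with
  | nil => intro p hp; cases hp
  | cons a rest ih =>
    simp only [List.map_cons, List.nodup_cons] at hnd
    intro p hp
    rcases List.mem_cons.mp hp with h | h
    · subst h; simp [List.find?]
    · have hne : a.1 ≠ p.1 := by
        intro he
        exact hnd.1 (he ▸ List.mem_map.mpr ⟨p, h, rfl⟩)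
      simp only [List.find?]
      rw [show (a.1 == p.1) = false from beq_eq_false_iff_ne.mpr hne]
      exact ih hnd.2 p h

theorem inner_eq (srg : List (Int × List Int)) (s1 : Int)
    (sub : List (Int × List Int))
    (h : ∀ p ∈ sub, srg.find? (fun q => q.1 == p.1) = some p) :
    set_and_get_initial_state_inner srg s1 sub
      = (sub.find? (fun p => p.2.length == 0)).map (fun p => (s1, p.1)) := by
  induction sub with
  | nil => rfl
  | cons a rest ih =>
    have ha := h a (List.mem_cons_self ..)
    have hrest : ∀ p ∈ rest, srg.find? (fun q => q.1 == p.1) = some p :=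
      fun p hp => h p (List.mem_cons_of_mem _ hp)
    obtain ⟨k, v⟩ := a
    simp only [set_and_get_initial_state_inner, ha, List.find?]
    by_cases hv : v.length = 0
    · simp [hv]
    · rw [show (v.length == 0) = false from by simpa using hv]
      simp only [if_neg hv]
      exact ih hrest

theorem outer_eq (t : List (Int × Option (List Int))) (srg : List (Int × List Int))
    (hs : (srg.map (·.1)).Nodup)
    (sub : List (Int × Option (List Int)))
    (h : ∀ p ∈ sub, t.find? (fun q => q.1 == p.1) = some p) :
    set_and_get_initial_state_outer t srg sub
      = match sub.find? (fun p => p.2.isNone) with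
        | none => none
        | some p1 => (srg.find? (fun p => p.2.length == 0)).map (fun p => (p1.1, p.1)) := by
  induction sub with
  | nil => rfl
  | cons a rest ih =>
    have ha := h a (List.mem_cons_self ..)
    have hrest : ∀ p ∈ rest, t.find? (fun q => q.1 == p.1) = some p :=
      fun p hp => h p (List.mem_cons_of_mem _ hp)
    obtain ⟨k, v⟩ := a
    simp only [set_and_get_initial_state_outer, ha, List.find?]
    cases v with
    | none =>
      rw [inner_eq srg k srg (find_self srg hs)]
      cases hf : srg.find? (fun p => p.2.length == 0) with
      | some p2 => simp
      | none =>
        simp only [Option.map_none]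
        rw [ih hrest]
        cases rest.find? (fun p => p.2.isNone) <;> simp [hf]
    | some lst =>
      simp only [Option.isNone_some]
      exact ih hrest

-- ===== VERDICT (by name: the statement is the Claim_ definition above) =====
theorem set_and_get_initial_state_spec : Claim_equal_set_and_get_initial_state := by
  intro t srg _ hpre
  unfold Spec_set_and_get_initial_state set_and_get_initial_state set_and_get_initial_state_alt
  rw [outer_eq t srg hpre.2 t (find_self t hpre.1)]
  cases t.find? (fun p => p.2.isNone) <;>
    cases srg.find? (fun p => p.2.length == 0) <;> rfl
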